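-- pv_equiv track=rewrite | github.com/fineman999/Algorithm | Programmers/Level1/a_knightly_weapon.py | solution
-- ===== SOURCE A (Python) =====
-- import math
--
-- def check_prime(number, divisor: list):
--     for i in range(2,int(math.sqrt(number))+1):
--         if not divisor[i]:
--             for j in range(2*i,number+1,i):
--                 divisor[j] = True
--     return divisor
--
-- def check_divisor(number, limit, power):
--     divisor = set()
--     for i in range(1,int(math.sqrt(number))+1):
--         if number%i==0:
--             divisor.add(i)
--             divisor.add(number//i)
--         if len(divisor) > limit:
--             return power
--     return len(divisor)
--
-- def solution(number, limit, power):
--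
--     prime_numbers = [False]*(number+1)
--     prime_numbers = check_prime(number, prime_numbers)
--
--     answer = 1
--     for i in range(2,number+1):
--         if not prime_numbers[i]:
--             answer += 2
--         else:
--             answer += check_divisor(i,limit, power)
--
--     return answer
-- ===== SOURCE B (Python) =====
-- def solution(number, limit, power):
--     # Divisor-count sieve: cnt[j] = number of divisors of j, built by one
--     # pass over multiples (O(n log n)) instead of per-number sqrt scans.
--     cnt = [0] * (number + 1)
--     for i in range(1, number + 1):
--         for j in range(i, number + 1, i):
--             cnt[j] += 1
--     answer = 1
--     for d in cnt[2:]: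
--         # d == 2 means prime: primes always weigh 2 (A's explicit prime branch);
--         # otherwise the limit/power rule applies.
--         answer += 2 if d == 2 else (d if d <= limit else power)
--     return answer
-- ===== Notes on version B (the rewrite author's own statement) =====
-- stated objective: faster
-- what changed: Replaced A's per-number work (a Boolean primality sieve plus, for each composite, a sqrt-bounded divisor-pair scan with early exit) by one divisor-count sieve that accumulates counts over multiples in a single O(n log n) pass, then applies the prime/limit/power weight rule to each count.
import Mathlib
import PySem

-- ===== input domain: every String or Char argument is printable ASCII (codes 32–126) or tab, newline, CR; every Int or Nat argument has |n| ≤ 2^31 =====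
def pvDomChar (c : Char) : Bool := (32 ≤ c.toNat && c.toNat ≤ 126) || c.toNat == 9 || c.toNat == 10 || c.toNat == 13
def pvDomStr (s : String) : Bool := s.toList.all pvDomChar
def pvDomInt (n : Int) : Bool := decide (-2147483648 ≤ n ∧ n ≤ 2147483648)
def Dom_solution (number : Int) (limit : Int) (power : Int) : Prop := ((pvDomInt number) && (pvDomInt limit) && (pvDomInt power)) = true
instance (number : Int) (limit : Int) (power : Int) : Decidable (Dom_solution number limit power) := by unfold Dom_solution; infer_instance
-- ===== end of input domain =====

-- B replaces A's primality sieve + per-composite sqrt divisor scans by one divisor-count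
-- sieve over multiples, then applies the same prime/limit/power weight rule (objective: faster).

-- ===== PORT A =====
-- int(math.sqrt(number)): math.sqrt is correctly rounded, so this equals Int.sqrt
-- exactly for 0 ≤ number ≤ 2^31 (float sqrt can only disagree far above 2^52).
def chkPrime (number : Int) (divisor : List Bool) : List Bool :=
  (PySem.List.pyRange 2 (Int.sqrt number + 1) 1).foldl (fun d i =>
    if PySem.List.pyGetD d i false = false then
      (PySem.List.pyRange (2*i) (number+1) i).foldl
        (fun d j => PySem.List.pySetD d j true) d
    else d) divisor

def chkDivisorGo (number : Int) (limit : Int) (power : Int) :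
    List Int → PySem.Set Int → Int
  | [], s => PySem.List.len s
  | i :: rest, s =>
    let s' := if PySem.Int.mod number i = 0 then
        PySem.Set.add (PySem.Set.add s i) (PySem.Int.floordiv number i) else s
    if limit < PySem.List.len s' then power
    else chkDivisorGo number limit power rest s'

def chkDivisor (number : Int) (limit : Int) (power : Int) : Int :=
  chkDivisorGo number limit power
    (PySem.List.pyRange 1 (Int.sqrt number + 1) 1) PySem.Set.empty

def solution (number : Int) (limit : Int) (power : Int) : Int :=
  let primes := chkPrime number (List.replicate (number+1).toNat false)
  (PySem.List.pyRange 2 (number+1) 1).foldl (fun answer i =>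
    if PySem.List.pyGetD primes i false = false then answer + 2
    else answer + chkDivisor i limit power) 1

-- ===== PORT B =====
def solution_alt (number : Int) (limit : Int) (power : Int) : Int :=
  let cnt : List Int := List.replicate (number+1).toNat 0
  let cnt := (PySem.List.pyRange 1 (number+1) 1).foldl (fun c i =>
      (PySem.List.pyRange i (number+1) i).foldl
        (fun c j => PySem.List.pySetD c j (PySem.List.pyGetD c j 0 + 1)) c) cnt
  (PySem.List.slice cnt (some 2) none).foldl
    (fun answer d => answer + (if d = 2 then 2 else if d ≤ limit then d else power)) 1

-- ===== PRECONDITION & SPEC =====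
-- math.sqrt(number) raises ValueError for number < 0; Pre_ admits exactly the inputs where A returns.
def Pre_solution (number : Int) (limit : Int) (power : Int) : Prop := 0 ≤ number
instance (number : Int) (limit : Int) (power : Int) : Decidable (Pre_solution number limit power) := by unfold Pre_solution; infer_instance
def pvWitness_solution : Int × Int × Int := (10, 3, 2)

def Spec_solution (number : Int) (limit : Int) (power : Int) (out : Int) : Prop := out = solution_alt number limit power
instance (number : Int) (limit : Int) (power : Int) (out : Int) : Decidable (Spec_solution number limit power out) := by unfold Spec_solution; infer_instance

-- ===== CLAIM (what is proved, stated in full; the proofs are below) =====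
def Claim_equal_solution : Prop := ∀ (number : Int) (limit : Int) (power : Int), Dom_solution number limit power → Pre_solution number limit power → Spec_solution number limit power (solution number limit power)

-- ===== LEMMAS AND PROOFS =====

theorem pv_getD_set {α : Type} (c : List α) (k : ℕ) (v d : α) (j : ℕ) :
    (c.set k v).getD j d = if j = k ∧ k < c.length then v else c.getD j d := by
  rcases Decidable.em (j = k ∧ k < c.length) with h | h
  · obtain ⟨rfl, hk⟩ := h
    simp [List.getD_eq_getElem?_getD, hk]
  · rw [if_neg h]
    by_cases hjk : j = k
    · subst hjk
      have hlen : ¬ j < c.length := by tauto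
      rw [List.getD_eq_getElem?_getD, List.getD_eq_getElem?_getD]
      rw [List.getElem?_eq_none (by simpa using hlen),
          List.getElem?_eq_none (by omega)]
    · simp [List.getD_eq_getElem?_getD, List.getElem?_set_ne (by omega : k ≠ j)]

theorem pv_pyGetD_toNat {α : Type} (c : List α) (x : Int) (hx : 0 ≤ x) (d : α) :
    PySem.List.pyGetD c x d = c.getD x.toNat d := by
  conv_lhs => rw [← Int.toNat_of_nonneg hx]
  rw [PySem.List.pyGetD_natCast]

theorem pv_length_foldl_set {α : Type} (g : List α → Int → α) (l : List Int) (c : List α) :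
    (l.foldl (fun c x => PySem.List.pySetD c x (g c x)) c).length = c.length := by
  induction l generalizing c with
  | nil => rfl
  | cons x l ih => simp [List.foldl_cons, ih, PySem.List.length_pySetD]

theorem pv_getD_foldl_mark (l : List Int) (c : List Bool)
    (h : ∀ x ∈ l, 0 ≤ x ∧ x < (c.length : Int)) (j : ℕ) :
    ((l.foldl (fun c x => PySem.List.pySetD c x true) c).getD j false = true)
      ↔ ((j : Int) ∈ l ∨ c.getD j false = true) := by
  induction l generalizing c with
  | nil => simp
  | cons x l ih =>
    obtain ⟨hx0, hxlen⟩ := h x (by simp)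
    rw [List.foldl_cons, PySem.List.pySetD_of_nonneg _ _ hx0]
    rw [ih _ (by intro y hy; have := h y (by simp [hy]); simpa [List.length_set] using this)]
    rw [pv_getD_set]
    constructor
    · rintro (hm | hset)
      · exact Or.inl (List.mem_cons_of_mem _ hm)
      · split at hset
        · rename_i hc
          exact Or.inl (by simp; left; omega)
        · exact Or.inr hset
    · rintro (hm | hold)
      · rcases List.mem_cons.mp hm with hjx | hm
        · right; rw [if_pos ⟨by omega, by omega⟩]
        · exact Or.inl hm
      · right; split
        · rfl
        · exact hold

theorem pv_getD_foldl_incr (l : List Int) (c : List Int)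
    (h : ∀ x ∈ l, 0 ≤ x ∧ x < (c.length : Int)) (j : ℕ) (hj : j < c.length) :
    (l.foldl (fun c x => PySem.List.pySetD c x (PySem.List.pyGetD c x 0 + 1)) c).getD j 0
      = c.getD j 0 + l.count (j : Int) := by
  induction l generalizing c with
  | nil => simp
  | cons x l ih =>
    obtain ⟨hx0, hxlen⟩ := h x (by simp)
    rw [List.foldl_cons, PySem.List.pySetD_of_nonneg _ _ hx0, pv_pyGetD_toNat _ _ hx0]
    rw [ih _ (by intro y hy; have := h y (by simp [hy]); simpa [List.length_set] using this)
          (by simpa [List.length_set] using hj)]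
    rw [pv_getD_set, List.count_cons]
    by_cases hjx : (j : Int) = x
    · subst hjx
      rw [if_pos ⟨by simp, by simpa using hj⟩]
      simp
      omega
    · rw [if_neg (by intro ⟨h1, _⟩; exact hjx (by omega))]
      simp
      intro hx; exact absurd hx.symm hjx

def pvMarked (m j : Int) : Prop := ∃ d : Int, 2 ≤ d ∧ d < m ∧ d ∣ j ∧ d < j

def pvSieveStep (n : Int) (d : List Bool) (i : Int) : List Bool :=
  if PySem.List.pyGetD d i false = false then
    (PySem.List.pyRange (2*i) (n+1) i).foldl
      (fun d j => PySem.List.pySetD d j true) d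
  else d

theorem pv_sieveStep_len (n : Int) (l : List Int) (c : List Bool) :
    (l.foldl (pvSieveStep n) c).length = c.length := by
  induction l generalizing c with
  | nil => rfl
  | cons x l ih =>
    rw [List.foldl_cons, ih]
    unfold pvSieveStep
    split
    · exact pv_length_foldl_set (fun _ _ => true) _ c
    · rfl

theorem pv_sqrt_le_self (n : Int) (hn : 0 ≤ n) : Int.sqrt n ≤ n := by
  unfold Int.sqrt
  have := Nat.sqrt_le_self n.toNat
  omega

theorem pv_sieve (n : Int) (hn : 0 ≤ n) (t : ℕ) (h2t : 2 + (t : Int) ≤ Int.sqrt n + 1) :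
    ∀ j : ℕ, (j : Int) ≤ n →
      (((PySem.List.pyRange 2 (2 + (t : Int)) 1).foldl (pvSieveStep n)
          (List.replicate (n+1).toNat false)).getD j false = true ↔ pvMarked (2 + (t : Int)) j) := by
  induction t with
  | zero =>
    intro j hj
    rw [show (2 + ((0:ℕ) : Int)) = 2 by norm_num, PySem.List.pyRange_one_eq_nil le_rfl]
    simp [List.getD_eq_getElem?_getD, pvMarked]
    intro x h1 h2 _
    omega
  | succ t ih =>
    intro j hj
    have hi : (2 : Int) + (t : Int) ≤ Int.sqrt n := by push_cast at h2t ⊢; omega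
    set i : Int := 2 + (t : Int) with hidef
    have hrange : PySem.List.pyRange 2 (2 + ((t+1 : ℕ) : Int)) 1
        = PySem.List.pyRange 2 i 1 ++ [i] := by
      push_cast
      rw [show (2 + ((t:Int) + 1)) = (2 + (t:Int)) + 1 by ring]
      exact PySem.List.pyRange_one_succ_right (by omega)
    rw [hrange, List.foldl_append, List.foldl_cons, List.foldl_nil]
    set S := (PySem.List.pyRange 2 i 1).foldl (pvSieveStep n) (List.replicate (n+1).toNat false) with hS
    have hSlen : S.length = (n+1).toNat := by
      rw [hS, pv_sieveStep_len]; simp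
    have hin : (i.toNat : Int) = i := by omega
    have hile : i ≤ n := le_trans (le_trans hi (le_refl _)) (pv_sqrt_le_self n hn)
    have hSiff : ∀ k : ℕ, (k : Int) ≤ n → (S.getD k false = true ↔ pvMarked i k) := by
      intro k hk; exact ih (by omega) k hk
    have hcond : PySem.List.pyGetD S i false = S.getD i.toNat false := pv_pyGetD_toNat _ _ (by omega) _
    unfold pvSieveStep
    rw [hcond]
    by_cases hmarked : S.getD i.toNat false = true
    · -- i already marked: skip; marked i ↔ marked (i+1)
      rw [if_neg (by rw [hmarked]; decide)]
      have hiComp : pvMarked i (i.toNat : Int) := (hSiff i.toNat (by omega)).mp hmarked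
      rw [hin] at hiComp
      rw [hSiff j hj]
      push_cast
      constructor
      · rintro ⟨d, h1, h2, h3, h4⟩; exact ⟨d, h1, by omega, h3, h4⟩
      · rintro ⟨d, h1, h2, h3, h4⟩
        by_cases hdi : d = i
        · subst hdi
          obtain ⟨e, he1, he2, he3, he4⟩ := hiComp
          exact ⟨e, he1, by omega, he3.trans h3, by omega⟩
        · exact ⟨d, h1, by omega, h3, h4⟩
    · -- i unmarked (prime): mark multiples
      rw [if_pos (by simpa using hmarked)]
      have hiPrime : ¬ pvMarked i i := by
        intro hm; exact hmarked ((hSiff i.toNat (by omega)).mpr (by rwa [hin]))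
      have hbounds : ∀ x ∈ PySem.List.pyRange (2*i) (n+1) i, 0 ≤ x ∧ x < (S.length : Int) := by
        intro x hx
        rw [PySem.List.mem_pyRange_iff_of_pos (by omega)] at hx
        constructor
        · omega
        · rw [hSlen]; omega
      rw [pv_getD_foldl_mark _ _ hbounds j]
      rw [hSiff j hj]
      rw [PySem.List.mem_pyRange_iff_of_pos (by omega)]
      push_cast
      constructor
      · rintro (⟨hx1, hx2, hx3⟩ | ⟨d, h1, h2, h3, h4⟩)
        · refine ⟨i, by omega, by omega, ?_, by omega⟩
          have : i ∣ ((j : Int) - 2*i) + 2*i := by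
            exact dvd_add hx3 (Dvd.intro 2 (by ring))
          simpa using this
        · exact ⟨d, h1, by omega, h3, h4⟩
      · rintro ⟨d, h1, h2, h3, h4⟩
        by_cases hdi : d = i
        · subst hdi
          left
          have hdvd := h3
          obtain ⟨k, hk⟩ := h3
          have hk2 : 2 ≤ k := by nlinarith
          refine ⟨by nlinarith, by omega, ?_⟩
          exact dvd_sub hdvd (Dvd.intro 2 (by ring))
        · right; exact ⟨d, h1, by omega, h3, h4⟩

theorem pv_chkPrime_iff (n : Int) (hn : 0 ≤ n) (j : ℕ) (hj : (j : Int) ≤ n) :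
    ((chkPrime n (List.replicate (n+1).toNat false)).getD j false = true
      ↔ pvMarked (Int.sqrt n + 1) j) := by
  have hsq : 0 ≤ Int.sqrt n := by unfold Int.sqrt; positivity
  unfold chkPrime
  by_cases hcase : Int.sqrt n + 1 ≤ 2
  · rw [PySem.List.pyRange_one_eq_nil hcase]
    simp only [List.foldl_nil]
    constructor
    · intro h
      exfalso
      have : (List.replicate (n+1).toNat false).getD j false = false := by
        rw [List.getD_eq_getElem?_getD, List.getElem?_replicate]
        split <;> simp
      rw [this] at h; exact Bool.false_ne_true h
    · rintro ⟨d, h1, h2, _, _⟩; omega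
  · have ht : Int.sqrt n + 1 = 2 + ((Int.sqrt n - 1).toNat : Int) := by omega
    rw [ht]
    exact pv_sieve n hn _ (by omega) j hj

theorem pv_marked_iff_not_prime (n j : Int) (h2 : 2 ≤ j) (hjn : j ≤ n) :
    pvMarked (Int.sqrt n + 1) j ↔ ¬ Nat.Prime j.toNat := by
  constructor
  · rintro ⟨d, hd2, hdm, hdvd, hdj⟩ hp
    have hdn : d.toNat ∣ j.toNat := by
      have : (d.toNat : Int) ∣ (j.toNat : Int) := by
        rwa [Int.toNat_of_nonneg (by omega), Int.toNat_of_nonneg (by omega)]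
      exact_mod_cast this
    rcases (Nat.Prime.eq_one_or_self_of_dvd hp _ hdn) with h | h <;> omega
  · intro hp
    have h2n : 2 ≤ j.toNat := by omega
    have hne1 : j.toNat ≠ 1 := by omega
    set p := j.toNat.minFac with hpdef
    have hpp : p.Prime := Nat.minFac_prime hne1
    have hpdvd : p ∣ j.toNat := Nat.minFac_dvd _
    have hpsq : p * p ≤ j.toNat := by
      have := Nat.minFac_sq_le_self (by omega) hp
      nlinarith [this, sq_nonneg p]
    have hple : p ≤ Nat.sqrt j.toNat := Nat.le_sqrt.mpr hpsq
    have hsqle : Nat.sqrt j.toNat ≤ Nat.sqrt n.toNat := Nat.sqrt_le_sqrt (by omega)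
    have hplt : p < j.toNat := by
      rcases Nat.lt_or_ge p j.toNat with h | h
      · exact h
      · exfalso
        have : p = j.toNat := le_antisymm (Nat.le_of_dvd (by omega) hpdvd) h
        rw [← this] at hp
        exact hp (this ▸ hpp)
    refine ⟨(p : Int), by exact_mod_cast hpp.two_le, ?_, ?_, by omega⟩
    · have : (p : Int) ≤ Int.sqrt n := by
        unfold Int.sqrt
        exact_mod_cast le_trans hple hsqle
      omega
    · have : (p : Int) ∣ (j.toNat : Int) := by exact_mod_cast hpdvd
      rwa [Int.toNat_of_nonneg (by omega)] at this

def pvTau (j : Int) : ℕ := (Nat.divisors j.toNat).card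

def pvDivSet (j : Int) : Finset Int := (Nat.divisors j.toNat).image (fun m : ℕ => (m : Int))

theorem pv_card_divSet (j : Int) : (pvDivSet j).card = pvTau j :=
  Finset.card_image_of_injective _ (fun a b h => by exact_mod_cast h)

theorem pv_mem_divSet (j : Int) (hj : 1 ≤ j) (x : Int) :
    x ∈ pvDivSet j ↔ 0 < x ∧ x ∣ j := by
  unfold pvDivSet
  simp only [Finset.mem_image, Nat.mem_divisors]
  constructor
  · rintro ⟨m, ⟨hdvd, hne⟩, rfl⟩
    have hm : 0 < m := Nat.pos_of_dvd_of_pos hdvd (by omega)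
    refine ⟨by exact_mod_cast hm, ?_⟩
    have : (m : Int) ∣ (j.toNat : Int) := by exact_mod_cast hdvd
    rwa [Int.toNat_of_nonneg (by omega)] at this
  · rintro ⟨hx, hdvd⟩
    refine ⟨x.toNat, ⟨?_, by omega⟩, by omega⟩
    have : (x.toNat : Int) ∣ (j.toNat : Int) := by
      rwa [Int.toNat_of_nonneg (by omega), Int.toNat_of_nonneg (by omega)]
    exact_mod_cast this

theorem pv_tau_prime (p : ℕ) (hp : p.Prime) : (Nat.divisors p).card = 2 := by
  rw [hp.divisors]
  exact Finset.card_pair (by have := hp.one_lt; omega)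

theorem pv_tau_composite (m : ℕ) (h2 : 2 ≤ m) (h : ¬ m.Prime) :
    3 ≤ (Nat.divisors m).card := by
  obtain ⟨d, hdvd, hd2, hdm⟩ := Nat.exists_dvd_of_not_prime2 h2 h
  have hsub : ({1, d, m} : Finset ℕ) ⊆ Nat.divisors m := by
    intro x hx
    simp at hx
    rcases hx with rfl | rfl | rfl
    · exact Nat.one_mem_divisors.mpr (by omega)
    · exact Nat.mem_divisors.mpr ⟨hdvd, by omega⟩
    · exact Nat.mem_divisors.mpr ⟨dvd_refl _, by omega⟩
  have hcard : ({1, d, m} : Finset ℕ).card = 3 := by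
    rw [Finset.card_insert_of_notMem (by simp; omega),
        Finset.card_insert_of_notMem (by simp; omega)]
    simp
  calc 3 = ({1, d, m} : Finset ℕ).card := hcard.symm
    _ ≤ _ := Finset.card_le_card hsub

theorem pv_tau_eq_two_iff (j : Int) (h2 : 2 ≤ j) : pvTau j = 2 ↔ Nat.Prime j.toNat := by
  constructor
  · intro h
    by_contra hp
    have := pv_tau_composite j.toNat (by omega) hp
    unfold pvTau at h
    omega
  · intro hp
    exact pv_tau_prime _ hp

def pvStep (n : Int) (s : PySem.Set Int) (i : Int) : PySem.Set Int :=
  if PySem.Int.mod n i = 0 then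
    PySem.Set.add (PySem.Set.add s i) (PySem.Int.floordiv n i) else s

theorem pv_len_add_le (s : PySem.Set Int) (x : Int) :
    s.length ≤ (PySem.Set.add s x).length := by
  rw [PySem.Set.add_eq_ite]
  split
  · exact le_refl _
  · simp

theorem pv_len_step_le (n : Int) (s : PySem.Set Int) (i : Int) :
    s.length ≤ (pvStep n s i).length := by
  unfold pvStep
  split
  · exact le_trans (pv_len_add_le s i) (pv_len_add_le _ _)
  · exact le_refl _

theorem pv_len_foldl_step_le (n : Int) (l : List Int) (s : PySem.Set Int) :
    s.length ≤ (l.foldl (pvStep n) s).length := by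
  induction l generalizing s with
  | nil => exact le_refl _
  | cons i l ih => exact le_trans (pv_len_step_le n s i) (ih _)

theorem pv_go_spec (n limit power : Int) (l : List Int) (s : PySem.Set Int)
    (h : (s.length : Int) ≤ limit ∨ l ≠ []) :
    chkDivisorGo n limit power l s =
      (if ((l.foldl (pvStep n) s).length : Int) ≤ limit
        then ((l.foldl (pvStep n) s).length : Int) else power) := by
  induction l generalizing s with
  | nil =>
    rcases h with h | h
    · rw [if_pos (by simpa using h)]
      simp [chkDivisorGo, PySem.List.len]
    · exact absurd rfl h
  | cons i l ih =>
    show (if limit < PySem.List.len (pvStep n s i) then power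
          else chkDivisorGo n limit power l (pvStep n s i)) = _
    rw [List.foldl_cons]
    rcases lt_or_ge limit (PySem.List.len (pvStep n s i)) with hlt | hge
    · rw [if_pos hlt]
      have hmono := pv_len_foldl_step_le n l (pvStep n s i)
      rw [if_neg (by rw [PySem.List.len_eq] at hlt; omega)]
    · rw [if_neg (by omega)]
      exact ih (pvStep n s i) (Or.inl (by rw [PySem.List.len_eq] at hge; exact_mod_cast hge))

theorem pv_mem_foldl_step (n : Int) (l : List Int) (s : PySem.Set Int) (x : Int) :
    x ∈ l.foldl (pvStep n) s ↔
      x ∈ s ∨ ∃ i ∈ l, PySem.Int.mod n i = 0 ∧ (x = i ∨ x = PySem.Int.floordiv n i) := by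
  induction l generalizing s with
  | nil => simp
  | cons i l ih =>
    rw [List.foldl_cons, ih]
    unfold pvStep
    constructor
    · rintro (hs | ⟨i', hi', hmod, hx⟩)
      · split at hs
        · rename_i hmod
          rcases (PySem.Set.mem_add _ _ _).mp hs with hs | hxeq
          · rcases (PySem.Set.mem_add _ _ _).mp hs with hs | hxeq
            · exact Or.inl hs
            · exact Or.inr ⟨i, by simp, hmod, Or.inl hxeq⟩
          · exact Or.inr ⟨i, by simp, hmod, Or.inr hxeq⟩
        · exact Or.inl hs
      · exact Or.inr ⟨i', by simp [hi'], hmod, hx⟩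
    · rintro (hs | ⟨i', hi', hmod, hx⟩)
      · left
        split
        · exact (PySem.Set.mem_add _ _ _).mpr (Or.inl ((PySem.Set.mem_add _ _ _).mpr (Or.inl hs)))
        · exact hs
      · rcases List.mem_cons.mp hi' with rfl | hi'
        · left
          rw [if_pos hmod]
          rcases hx with rfl | rfl
          · exact (PySem.Set.mem_add _ _ _).mpr (Or.inl ((PySem.Set.mem_add _ _ _).mpr (Or.inr rfl)))
          · exact (PySem.Set.mem_add _ _ _).mpr (Or.inr rfl)
        · exact Or.inr ⟨i', hi', hmod, hx⟩

theorem pv_nodup_foldl_step (n : Int) (l : List Int) (s : PySem.Set Int) (hs : s.Nodup) :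
    (l.foldl (pvStep n) s).Nodup := by
  induction l generalizing s with
  | nil => exact hs
  | cons i l ih =>
    refine ih _ ?_
    unfold pvStep
    split
    · exact PySem.Set.nodup_add _ _ (PySem.Set.nodup_add _ _ hs)
    · exact hs

-- divisor-pair argument, in ℕ
theorem pv_pair (m a : ℕ) (hm : 1 ≤ m) (ha : a ∣ m) (ha1 : 1 ≤ a) :
    ∃ i : ℕ, 1 ≤ i ∧ i ≤ Nat.sqrt m ∧ i ∣ m ∧ (a = i ∨ a = m / i) := by
  rcases le_or_gt a (Nat.sqrt m) with h | h
  · exact ⟨a, ha1, h, ha, Or.inl rfl⟩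
  · refine ⟨m / a, ?_, ?_, Nat.div_dvd_of_dvd ha, Or.inr (Nat.div_div_self ha (by omega)).symm⟩
    · exact Nat.div_pos (Nat.le_of_dvd (by omega) ha) (by omega)
    · -- m/a ≤ sqrt m since a > sqrt m
      have haa : m < a * a := by simpa [pow_two] using Nat.sqrt_lt'.mp h
      have hb : m / a * a = m := Nat.div_mul_cancel ha
      have hba : m / a < a := by nlinarith [hb]
      refine Nat.le_sqrt.mpr ?_
      calc m / a * (m / a) ≤ m / a * a := Nat.mul_le_mul_left _ (by omega)
        _ = m := hb

theorem pv_mem_F_iff (n : Int) (hn : 1 ≤ n) (x : Int) :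
    (x ∈ (PySem.List.pyRange 1 (Int.sqrt n + 1) 1).foldl (pvStep n) PySem.Set.empty)
      ↔ 0 < x ∧ x ∣ n := by
  rw [pv_mem_foldl_step]
  have hempty : x ∈ (PySem.Set.empty : PySem.Set Int) ↔ False := by simp [PySem.Set.empty]
  simp only [hempty, false_or]
  constructor
  · rintro ⟨i, hi, hmod, hx⟩
    rw [PySem.List.mem_pyRange_one] at hi
    have hipos : 0 < i := by omega
    have hdvd : i ∣ n := (PySem.Int.mod_eq_zero_iff_dvd n i).mp hmod
    rcases hx with rfl | rfl
    · exact ⟨hipos, hdvd⟩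
    · rw [PySem.Int.floordiv_eq_ediv_of_pos hipos]
      constructor
      · have := Int.ediv_mul_cancel hdvd
        nlinarith [this]
      · exact Int.ediv_dvd_of_dvd hdvd
  · rintro ⟨hx, hdvd⟩
    -- transfer to ℕ
    have hxn : (x.toNat : Int) = x := by omega
    have hnn : (n.toNat : Int) = n := by omega
    have hdvdN : x.toNat ∣ n.toNat := by
      have : (x.toNat : Int) ∣ (n.toNat : Int) := by rw [hxn, hnn]; exact hdvd
      exact_mod_cast this
    obtain ⟨i, hi1, hisq, hidvd, hieq⟩ := pv_pair n.toNat x.toNat (by omega) hdvdN (by omega)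
    refine ⟨(i : Int), ?_, ?_, ?_⟩
    · rw [PySem.List.mem_pyRange_one]
      constructor
      · exact_mod_cast hi1
      · have : (i : Int) ≤ Int.sqrt n := by unfold Int.sqrt; exact_mod_cast hisq
        omega
    · rw [PySem.Int.mod_eq_zero_iff_dvd]
      have : (i : Int) ∣ (n.toNat : Int) := by exact_mod_cast hidvd
      rwa [hnn] at this
    · rcases hieq with h | h
      · left; omega
      · right
        rw [PySem.Int.floordiv_eq_ediv_of_pos (by exact_mod_cast hi1)]
        have hcast : ((n.toNat / i : ℕ) : Int) = (n.toNat : Int) / (i : Int) :=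
          Int.natCast_ediv n.toNat i
        rw [hnn] at hcast
        omega

theorem pv_F_length (n : Int) (hn : 1 ≤ n) :
    ((PySem.List.pyRange 1 (Int.sqrt n + 1) 1).foldl (pvStep n) PySem.Set.empty).length
      = pvTau n := by
  set F := (PySem.List.pyRange 1 (Int.sqrt n + 1) 1).foldl (pvStep n) PySem.Set.empty with hF
  have hnodup : F.Nodup := pv_nodup_foldl_step n _ _ (by simp [PySem.Set.empty])
  have : F.toFinset = pvDivSet n := by
    ext x
    rw [List.mem_toFinset, pv_mem_F_iff n hn, pv_mem_divSet n (by omega)]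
  rw [← pv_card_divSet, ← this, List.toFinset_card_of_nodup hnodup]

theorem pv_chkDivisor (n limit power : Int) (hn : 1 ≤ n) :
    chkDivisor n limit power = if (pvTau n : Int) ≤ limit then (pvTau n : Int) else power := by
  unfold chkDivisor
  have hsq : 1 ≤ Int.sqrt n := by
    unfold Int.sqrt
    have : 1 ≤ Nat.sqrt n.toNat := Nat.sqrt_pos.mpr (by omega)
    exact_mod_cast this
  have hne : PySem.List.pyRange 1 (Int.sqrt n + 1) 1 ≠ [] := by
    rw [PySem.List.pyRange_one_cons (by omega)]
    simp
  rw [pv_go_spec n limit power _ _ (Or.inr hne), pv_F_length n hn]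

def pvW (limit power : Int) (t : ℕ) : Int :=
  if (t : Int) = 2 then 2 else if (t : Int) ≤ limit then (t : Int) else power

def pvCntStep (n : Int) (c : List Int) (i : Int) : List Int :=
  (PySem.List.pyRange i (n+1) i).foldl
    (fun c j => PySem.List.pySetD c j (PySem.List.pyGetD c j 0 + 1)) c

theorem pv_cnt_len (n : Int) (l : List Int) (c : List Int) :
    (l.foldl (pvCntStep n) c).length = c.length := by
  induction l generalizing c with
  | nil => rfl
  | cons i l ih =>
    rw [List.foldl_cons, ih]
    exact pv_length_foldl_set _ _ _

theorem pv_cnt_outer (n : Int) (hn : 0 ≤ n) (l : List Int) (hl : ∀ i ∈ l, 1 ≤ i)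
    (c : List Int) (hc : c.length = (n+1).toNat) (j : ℕ) (hj : j < c.length) :
    (l.foldl (pvCntStep n) c).getD j 0
      = c.getD j 0 + (l.map (fun i => ((PySem.List.pyRange i (n+1) i).count ((j : Int)) : Int))).sum := by
  induction l generalizing c with
  | nil => simp
  | cons i l ih =>
    have hi1 : 1 ≤ i := hl i (by simp)
    rw [List.foldl_cons]
    have hstep : (pvCntStep n c i).length = c.length := pv_length_foldl_set _ _ _
    rw [ih (by intro y hy; exact hl y (by simp [hy])) _ (by omega) (by omega)]
    have hbounds : ∀ x ∈ PySem.List.pyRange i (n+1) i, 0 ≤ x ∧ x < (c.length : Int) := by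
      intro x hx
      rw [PySem.List.mem_pyRange_iff_of_pos (by omega)] at hx
      constructor
      · omega
      · rw [hc]; omega
    unfold pvCntStep
    rw [pv_getD_foldl_incr _ _ hbounds j hj]
    simp only [List.map_cons, List.sum_cons]
    ring

theorem pv_count_range (n i : Int) (hi : 1 ≤ i) (j : ℕ) (hj1 : 1 ≤ j) (hjn : (j : Int) ≤ n) :
    ((PySem.List.pyRange i (n+1) i).count ((j : Int)) : Int)
      = if i ∣ (j : Int) then 1 else 0 := by
  have hnodup : (PySem.List.pyRange i (n+1) i).Nodup := by
    rw [PySem.List.pyRange_of_pos _ _ (by omega)]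
    refine List.Nodup.map ?_ (List.nodup_range)
    intro a b hab
    simp only at hab
    have : (a : Int) = (b : Int) := by
      have := hab
      nlinarith [hab]
    exact_mod_cast this
  have hmem : (j : Int) ∈ PySem.List.pyRange i (n+1) i ↔ i ∣ (j : Int) := by
    rw [PySem.List.mem_pyRange_iff_of_pos (by omega)]
    constructor
    · rintro ⟨h1, h2, h3⟩
      have : i ∣ ((j : Int) - i) + i := dvd_add h3 (dvd_refl i)
      simpa using this
    · intro hdvd
      refine ⟨Int.le_of_dvd (by exact_mod_cast hj1) hdvd, by omega, dvd_sub hdvd (dvd_refl i)⟩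
  split
  · rename_i hdvd
    exact_mod_cast List.count_eq_one_of_mem hnodup (hmem.mpr hdvd)
  · rename_i hdvd
    exact_mod_cast List.count_eq_zero_of_not_mem (fun hm => hdvd (hmem.mp hm))

theorem pv_cnt_getD (n : Int) (hn : 0 ≤ n) (j : ℕ) (hj1 : 1 ≤ j) (hjn : (j : Int) ≤ n) :
    ((PySem.List.pyRange 1 (n+1) 1).foldl (pvCntStep n) (List.replicate (n+1).toNat 0)).getD j 0
      = (pvTau j : Int) := by
  have hrep : (List.replicate (n+1).toNat (0:Int)).getD j 0 = 0 := by
    rw [List.getD_eq_getElem?_getD, List.getElem?_replicate]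
    split <;> simp
  rw [pv_cnt_outer n hn _ (by intro i hi; rw [PySem.List.mem_pyRange_one] at hi; omega)
      _ (by simp) j (by simp; omega), hrep, zero_add]
  have hmap : (PySem.List.pyRange 1 (n+1) 1).map
        (fun i => ((PySem.List.pyRange i (n+1) i).count ((j : Int)) : Int))
      = (PySem.List.pyRange 1 (n+1) 1).map
        (fun i => if (fun i => decide (i ∣ (j:Int))) i = true then (1:Int) else 0) := by
    refine List.map_congr_left (fun i hi => ?_)
    rw [PySem.List.mem_pyRange_one] at hi
    rw [pv_count_range n i (by omega) j hj1 hjn]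
    simp
  rw [hmap, PySem.List.sum_map_ite_one_zero, List.countP_eq_length_filter]
  have hnodup : ((PySem.List.pyRange 1 (n+1) 1).filter (fun i => decide (i ∣ (j:Int)))).Nodup :=
    List.Nodup.filter _ (PySem.List.nodup_pyRange_one _ _)
  have hfin : ((PySem.List.pyRange 1 (n+1) 1).filter (fun i => decide (i ∣ (j:Int)))).toFinset
      = pvDivSet j := by
    ext x
    rw [List.mem_toFinset, List.mem_filter, PySem.List.mem_pyRange_one,
        pv_mem_divSet _ (by omega)]
    constructor
    · rintro ⟨⟨h1, h2⟩, h3⟩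
      exact ⟨by omega, by simpa using h3⟩
    · rintro ⟨h1, h2⟩
      refine ⟨⟨by omega, ?_⟩, by simpa using h2⟩
      have := Int.le_of_dvd (by exact_mod_cast hj1) h2
      omega
  rw [← List.toFinset_card_of_nodup hnodup, hfin, pv_card_divSet]

theorem pv_solution_eq (number limit power : Int) (hn : 0 ≤ number) :
    solution number limit power = solution_alt number limit power := by
  -- A side
  have hA : solution number limit power
      = 1 + ((PySem.List.pyRange 2 (number+1) 1).map
          (fun i => pvW limit power (pvTau i))).sum := by
    simp only [solution]
    have hcong := PySem.List.foldl_congr_mem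
      (l := PySem.List.pyRange 2 (number+1) 1) (init := (1:Int))
      (f := fun answer i =>
        if PySem.List.pyGetD (chkPrime number (List.replicate (number+1).toNat false)) i false = false
        then answer + 2 else answer + chkDivisor i limit power)
      (g := fun answer i => answer + pvW limit power (pvTau i))
      (by
        intro acc i hi
        dsimp only
        rw [PySem.List.mem_pyRange_one] at hi
        have hitn : (i.toNat : Int) = i := by omega
        have hcp := pv_chkPrime_iff number hn i.toNat (by omega)
        rw [hitn] at hcp
        have hmk := pv_marked_iff_not_prime number i (by omega) (by omega)
        rw [pv_pyGetD_toNat _ _ (by omega)]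
        by_cases hp : Nat.Prime i.toNat
        · have hfalse : (chkPrime number (List.replicate (number+1).toNat false)).getD i.toNat false = false := by
            rcases Bool.eq_false_or_eq_true ((chkPrime number (List.replicate (number+1).toNat false)).getD i.toNat false) with h | h
            all_goals first
              | exact h
              | exact absurd (hmk.mp (hcp.mp h)) (by simpa using hp)
          rw [hfalse, if_pos rfl]
          have htau : pvTau i = 2 := (pv_tau_eq_two_iff i (by omega)).mpr hp
          simp only [pvW, htau]
          norm_num
        · have htrue : (chkPrime number (List.replicate (number+1).toNat false)).getD i.toNat false = true :=
            hcp.mpr (hmk.mpr hp)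
          rw [htrue, if_neg (by simp)]
          have htau : pvTau i ≠ 2 := fun h => hp ((pv_tau_eq_two_iff i (by omega)).mp h)
          rw [pv_chkDivisor i limit power (by omega)]
          simp only [pvW]
          have h2 : ¬((pvTau i : Int) = 2) := by exact_mod_cast htau
          rw [if_neg h2])
    rw [hcong, PySem.List.foldl_add]
  -- B side
  have hB : solution_alt number limit power
      = 1 + ((PySem.List.pyRange 2 (number+1) 1).map
          (fun i => pvW limit power (pvTau i))).sum := by
    simp only [solution_alt]
    rw [show (fun (c : List Int) (i : Int) =>
        (PySem.List.pyRange i (number+1) i).foldl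
          (fun c j => PySem.List.pySetD c j (PySem.List.pyGetD c j 0 + 1)) c)
      = pvCntStep number from rfl]
    set cnt := (PySem.List.pyRange 1 (number+1) 1).foldl (pvCntStep number)
        (List.replicate (number+1).toNat 0) with hcnt
    have hcl : cnt.length = (number+1).toNat := by
      rw [hcnt, pv_cnt_len]; simp
    have hslice : PySem.List.slice cnt (some 2) none = cnt.drop 2 := by
      rw [PySem.List.slice_from _ (by norm_num)]
      rfl
    have hdrop : cnt.drop 2 = (PySem.List.pyRange 2 (number+1) 1).map
        (fun i => (pvTau i : Int)) := by
      apply List.ext_getElem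
      · rw [List.length_drop, hcl, List.length_map, PySem.List.length_pyRange_one]
        omega
      · intro k h1 h2
        rw [List.getElem_drop, List.getElem_map, PySem.List.getElem_pyRange_one]
        have hklt : 2 + k < cnt.length := by
          rw [List.length_drop] at h1; omega
        rw [← List.getD_eq_getElem cnt 0 hklt]
        rw [hcnt, pv_cnt_getD number hn (2+k) (by omega) (by rw [hcl] at hklt; omega)]
        have hcast : ((2+k : ℕ) : Int) = 2 + (k : Int) := by push_cast; ring
        rw [hcast]
    rw [hslice, hdrop, List.foldl_map]
    rw [PySem.List.foldl_congr_mem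
      (l := PySem.List.pyRange 2 (number+1) 1) (init := (1:Int))
      (f := fun x y => x + if ((pvTau y : Int)) = 2 then 2 else if (pvTau y : Int) ≤ limit then (pvTau y : Int) else power)
      (g := fun x y => x + pvW limit power (pvTau y))
      (by intro acc x _; rfl)]
    rw [PySem.List.foldl_add]
  rw [hA, hB]

-- ===== VERDICT (by name: the statement is the Claim_ definition above) =====
theorem solution_spec : Claim_equal_solution := by
  intro number limit power _ hpre
  unfold Spec_solution
  exact pv_solution_eq number limit power hpre
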